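-- pv_equiv track=rewrite | github.com/AP-MI-2021/lab-3-ghiuraulucas | main.py | numai_numere_doar_cu_cifre_prime
-- ===== SOURCE A (Python) =====
-- def numai_numere_doar_cu_cifre_prime(l):
--     '''
--     Determina daca intr-o lista toate numerele sunt formate doar idn cifre prime.
--     :param l: lista de numere intregi.
--     :return: True, daca conditia pusa e adevarata.
--     '''
--     m=0
--     for x in l:
--         q=0
--         while x>0:
--             a = x % 10
--             if a < 2:
--                 q = q+1
--             for i in range(2, a//2+1):
--                 if a % i == 0:
--                     q = q + 1
--             if q != 0:
--                 m = m + 1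
--             x = x // 10
--     if m != 0:
--         return False
--     else:
--         return True
-- ===== SOURCE B (Python) =====
-- def numai_numere_doar_cu_cifre_prime(l):
--     '''
--     Determina daca intr-o lista toate numerele sunt formate doar din cifre prime.
--     :param l: lista de numere intregi.
--     :return: True, daca conditia pusa e adevarata.
--     '''
--     return all(set(str(x)) <= {'2', '3', '5', '7'} for x in l if x > 0)
-- ===== Notes on version B (the rewrite author's own statement) =====
-- stated objective: idiomatic
-- what changed: A extracts digits with %10 and //10 and tests each digit's primality by an inner trial-division loop while counting failures; B is a one-line all(...) that checks, for each positive number, that the character set of str(x) is a subset of {'2','3','5','7'}.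
import Mathlib
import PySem

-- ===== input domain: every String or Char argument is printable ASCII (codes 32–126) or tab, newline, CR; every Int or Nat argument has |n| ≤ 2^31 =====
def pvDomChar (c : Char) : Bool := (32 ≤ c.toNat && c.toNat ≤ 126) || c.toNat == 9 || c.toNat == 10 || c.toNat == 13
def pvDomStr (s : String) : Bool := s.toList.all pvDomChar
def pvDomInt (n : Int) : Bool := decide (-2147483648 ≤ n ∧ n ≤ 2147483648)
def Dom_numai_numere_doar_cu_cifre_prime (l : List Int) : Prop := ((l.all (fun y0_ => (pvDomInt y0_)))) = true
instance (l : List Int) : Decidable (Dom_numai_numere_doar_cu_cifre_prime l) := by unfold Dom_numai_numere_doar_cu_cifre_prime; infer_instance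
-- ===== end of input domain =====

-- B replaces A's per-digit modulo extraction with trial-division primality by a string
-- digit check: all positive numbers must use only characters '2','3','5','7' (idiomatic; a timing run measured it faster by a constant factor).

-- ===== PORT A =====
-- the inner 'for i in range(2, a//2+1)' loop of A
def pvForQ (a q : Int) : Int :=
  (PySem.List.pyRange 2 (PySem.Int.floordiv a 2 + 1) 1).foldl
    (fun q i => if PySem.Int.mod a i = 0 then q + 1 else q) q

-- the 'while x > 0' loop of A; returns the updated m
def pvWhileA (x q m : Int) : Int :=
  if _hx : 0 < x then
    let a := PySem.Int.mod x 10
    let q1 := if a < 2 then q + 1 else q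
    let q2 := pvForQ a q1
    let m1 := if q2 ≠ 0 then m + 1 else m
    pvWhileA (PySem.Int.floordiv x 10) q2 m1
  else m
termination_by x.toNat
decreasing_by
  rw [PySem.Int.floordiv_eq_ediv_of_pos (by omega : (0:Int) < 10)]
  omega

def numai_numere_doar_cu_cifre_prime (l : List Int) : Bool :=
  let m := l.foldl (fun m x => pvWhileA x 0 m) 0
  if m ≠ 0 then false else true

-- ===== PORT B =====
def numai_numere_doar_cu_cifre_prime_alt (l : List Int) : Bool :=
  (l.filter (fun x => decide (0 < x))).all
    (fun x => PySem.Set.issubset (PySem.Set.ofList (PySem.Int.toStr x).toList)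
        (PySem.Set.ofList ['2', '3', '5', '7']))

-- ===== PRECONDITION & SPEC =====
def Spec_numai_numere_doar_cu_cifre_prime (l : List Int) (out : Bool) : Prop := out = numai_numere_doar_cu_cifre_prime_alt l
instance (l : List Int) (out : Bool) : Decidable (Spec_numai_numere_doar_cu_cifre_prime l out) := by unfold Spec_numai_numere_doar_cu_cifre_prime; infer_instance

-- ===== CLAIM (what is proved, stated in full; the proofs are below) =====
def Claim_equal_numai_numere_doar_cu_cifre_prime : Prop := ∀ (l : List Int), Dom_numai_numere_doar_cu_cifre_prime l → Spec_numai_numere_doar_cu_cifre_prime l (numai_numere_doar_cu_cifre_prime l)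

-- ===== LEMMAS AND PROOFS =====

-- arithmetic "all digits of x are prime digits" (the common ground of both proofs)
def pvGoodDigit (a : Int) : Bool := a == 2 || a == 3 || a == 5 || a == 7

def pvAllP (x : Int) : Bool :=
  if _hx : 0 < x then pvGoodDigit (PySem.Int.mod x 10) && pvAllP (PySem.Int.floordiv x 10) else true
termination_by x.toNat
decreasing_by
  rw [PySem.Int.floordiv_eq_ediv_of_pos (by omega : (0:Int) < 10)]
  omega

theorem pvAllP_nonpos (x : Int) (hx : ¬ 0 < x) : pvAllP x = true := by
  rw [pvAllP]; simp [hx]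

-- A's inner for-loop only shifts the accumulator
theorem pvFoldShift (L : List Int) (p : Int → Prop) [DecidablePred p] :
    ∀ q : Int, L.foldl (fun q i => if p i then q + 1 else q) q
      = q + L.foldl (fun q i => if p i then q + 1 else q) 0 := by
  induction L with
  | nil => intro q; simp
  | cons a t ih =>
      intro q
      simp only [List.foldl_cons]
      rw [ih, ih (if p a then 0 + 1 else 0)]
      split_ifs <;> ring

-- what one digit a adds to A's q counter
def pvDelta (a : Int) : Int := (if a < 2 then 1 else 0) + pvForQ a 0

theorem pvStep (a q : Int) :
    pvForQ a (if a < 2 then q + 1 else q) = q + pvDelta a := by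
  unfold pvDelta pvForQ
  rw [pvFoldShift _ (fun i => PySem.Int.mod a i = 0)]
  split_ifs <;> ring

theorem pvDelta_nonneg (a : Int) (h0 : 0 ≤ a) (h9 : a < 10) : 0 ≤ pvDelta a := by
  interval_cases a <;> decide

theorem pvDelta_zero_iff (a : Int) (h0 : 0 ≤ a) (h9 : a < 10) :
    pvDelta a = 0 ↔ pvGoodDigit a = true := by
  interval_cases a <;> decide

theorem pvWhileA_nonneg (x q m : Int) (hm : 0 ≤ m) : 0 ≤ pvWhileA x q m := by
  rw [pvWhileA]
  by_cases hx : 0 < x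
  · simp only [hx, dif_pos]
    exact pvWhileA_nonneg _ _ _ (by split_ifs <;> omega)
  · simpa [hx] using hm
termination_by x.toNat
decreasing_by
  rw [PySem.Int.floordiv_eq_ediv_of_pos (by omega : (0:Int) < 10)]
  omega

theorem pvWhileA_zero_iff (x q m : Int) (hq : 0 ≤ q) (hm : 0 ≤ m) :
    pvWhileA x q m = 0 ↔ (m = 0 ∧ (x ≤ 0 ∨ (q = 0 ∧ pvAllP x = true))) := by
  rw [pvWhileA]
  by_cases hx : 0 < x
  · simp only [hx, dif_pos]
    have hmod0 : (0:Int) ≤ PySem.Int.mod x 10 := PySem.Int.mod_nonneg x (by omega)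
    have hmod9 : PySem.Int.mod x 10 < 10 := PySem.Int.mod_lt x (by omega)
    rw [pvStep]
    have hd0 := pvDelta_nonneg _ hmod0 hmod9
    have hdz := pvDelta_zero_iff _ hmod0 hmod9
    rw [pvAllP]
    simp only [hx, dif_pos, Bool.and_eq_true]
    have ih := pvWhileA_zero_iff (PySem.Int.floordiv x 10)
        (q + pvDelta (PySem.Int.mod x 10))
        (if (q + pvDelta (PySem.Int.mod x 10)) ≠ 0 then m + 1 else m)
        (by omega) (by split_ifs <;> omega)
    rw [ih]
    constructor
    · rintro ⟨hm1, hrest⟩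
      have hq2 : q + pvDelta (PySem.Int.mod x 10) = 0 := by
        by_contra hne
        rw [if_pos hne] at hm1
        omega
      have hqz : q = 0 := by omega
      have hgood : pvGoodDigit (PySem.Int.mod x 10) = true := hdz.mp (by omega)
      refine ⟨by rwa [if_neg (by omega)] at hm1, Or.inr ⟨hqz, hgood, ?_⟩⟩
      rcases hrest with h | ⟨_, hall⟩
      · exact pvAllP_nonpos _ (by omega)
      · exact hall
    · rintro ⟨hm0, h⟩
      rcases h with h | ⟨hqz, hgood, hall⟩
      · omega
      · have hq2 : q + pvDelta (PySem.Int.mod x 10) = 0 := by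
          have := hdz.mpr hgood; omega
        rw [if_neg (by omega)]
        exact ⟨hm0, Or.inr ⟨hq2, hall⟩⟩
  · rw [dif_neg hx]
    constructor
    · intro h; exact ⟨h, Or.inl (by omega)⟩
    · rintro ⟨h, _⟩; exact h
termination_by x.toNat
decreasing_by
  rw [PySem.Int.floordiv_eq_ediv_of_pos (by omega : (0:Int) < 10)]
  omega

theorem pvFoldA_zero_iff (l : List Int) :
    ∀ m : Int, 0 ≤ m →
      (l.foldl (fun m x => pvWhileA x 0 m) m = 0
        ↔ (m = 0 ∧ ∀ x ∈ l, x ≤ 0 ∨ pvAllP x = true)) := by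
  induction l with
  | nil => intro m hm; simp
  | cons x t ih =>
      intro m hm
      simp only [List.foldl_cons]
      rw [ih _ (pvWhileA_nonneg x 0 m hm),
          pvWhileA_zero_iff x 0 m le_rfl hm]
      constructor
      · rintro ⟨⟨hm0, h⟩, hall⟩
        exact ⟨hm0, by
          intro y hy
          rcases List.mem_cons.mp hy with rfl | hy
          · rcases h with h | ⟨_, h⟩ <;> [exact Or.inl h; exact Or.inr h]
          · exact hall y hy⟩
      · rintro ⟨hm0, hall⟩
        refine ⟨⟨hm0, ?_⟩, fun y hy => hall y (List.mem_cons_of_mem _ hy)⟩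
        rcases hall x (List.mem_cons_self) with h | h
        · exact Or.inl h
        · exact Or.inr ⟨rfl, h⟩

-- ===== B side: decimal string of a positive number =====

-- big-endian decimal digits, structural recursion (matches Nat.toDigitsCore's output)
def pvRep (n : Nat) : List Char :=
  if h : n / 10 = 0 then [Nat.digitChar (n % 10)]
  else pvRep (n / 10) ++ [Nat.digitChar (n % 10)]
termination_by n
decreasing_by omega

theorem pvToDigitsCore_eq (n : Nat) :
    ∀ (fuel : Nat) (ds : List Char), n < fuel →
      Nat.toDigitsCore 10 fuel n ds = pvRep n ++ ds := by
  induction n using Nat.strong_induction_on with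
  | _ n ih =>
      intro fuel ds hlt
      cases fuel with
      | zero => omega
      | succ f =>
          rw [Nat.toDigitsCore]
          rw [pvRep]
          by_cases h : n / 10 = 0
          · simp [h]
          · simp only [h, if_neg, not_false_eq_true, dif_neg]
            rw [ih (n / 10) (by omega) f _ (by omega)]
            simp

theorem pvToDigits_eq (n : Nat) : Nat.toDigits 10 n = pvRep n :=
  (pvToDigitsCore_eq n (n + 1) [] (by omega)).trans (by simp)

theorem pvDigitChar_mem (k : Nat) (hk : k < 10) :
    (Nat.digitChar k ∈ (['2', '3', '5', '7'] : List Char)) ↔ pvGoodDigit (k : Int) = true := by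
  interval_cases k <;> decide

theorem pvRep_allP (x : Int) (hx : 0 < x) :
    (∀ c ∈ pvRep x.toNat, c ∈ (['2', '3', '5', '7'] : List Char)) ↔ pvAllP x = true := by
  have hmod : PySem.Int.mod x 10 = ((x.toNat % 10 : Nat) : Int) := by
    rw [PySem.Int.mod_eq_emod_of_pos (by omega : (0:Int) < 10)]; omega
  have hdiv : PySem.Int.floordiv x 10 = ((x.toNat / 10 : Nat) : Int) := by
    rw [PySem.Int.floordiv_eq_ediv_of_pos (by omega : (0:Int) < 10)]; omega
  rw [pvAllP]
  simp only [hx, dif_pos, Bool.and_eq_true]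
  rw [pvRep]
  by_cases h : x.toNat / 10 = 0
  · simp only [h, dif_pos, List.mem_singleton, forall_eq]
    rw [hmod]
    have hx0 : pvAllP (PySem.Int.floordiv x 10) = true := by
      rw [hdiv, h]; exact pvAllP_nonpos 0 (by omega)
    rw [hx0]
    simpa using pvDigitChar_mem (x.toNat % 10) (by omega)
  · simp only [h, dif_neg, not_false_eq_true, List.mem_append, List.mem_singleton]
    have hx' : 0 < PySem.Int.floordiv x 10 := by rw [hdiv]; omega
    have ih := pvRep_allP (PySem.Int.floordiv x 10) hx'
    rw [hdiv] at ih ⊢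
    have htn : ((x.toNat / 10 : Nat) : Int).toNat = x.toNat / 10 := by omega
    rw [htn] at ih
    rw [hmod]
    constructor
    · intro hall
      refine ⟨?_, ih.mp fun c hc => hall c (Or.inl hc)⟩
      exact (pvDigitChar_mem (x.toNat % 10) (by omega)).mp (hall _ (Or.inr rfl))
    · rintro ⟨hg, hrest⟩ c hc
      rcases hc with hc | rfl
      · exact ih.mpr hrest c hc
      · exact (pvDigitChar_mem (x.toNat % 10) (by omega)).mpr hg
termination_by x.toNat
decreasing_by
  rw [PySem.Int.floordiv_eq_ediv_of_pos (by omega : (0:Int) < 10)]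
  omega

theorem pvAlt_iff (l : List Int) :
    numai_numere_doar_cu_cifre_prime_alt l = true
      ↔ ∀ x ∈ l, x ≤ 0 ∨ pvAllP x = true := by
  unfold numai_numere_doar_cu_cifre_prime_alt
  rw [List.all_eq_true]
  constructor
  · intro h x hx
    by_cases hpos : 0 < x
    · refine Or.inr ?_
      have hmem := h x (List.mem_filter.mpr ⟨hx, by simpa using hpos⟩)
      rw [PySem.Set.issubset_iff] at hmem
      refine (pvRep_allP x hpos).mp ?_
      intro c hc
      have := hmem c (by
        rw [PySem.Set.mem_ofList, PySem.Int.toList_toStr]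
        unfold PySem.Int.toChars
        rw [if_neg (by omega), pvToDigits_eq]
        simpa using hc)
      rwa [PySem.Set.mem_ofList] at this
    · exact Or.inl (by omega)
  · intro h x hx
    have hpos : 0 < x := by
      have := (List.mem_filter.mp hx).2; simpa using this
    have hmem := (List.mem_filter.mp hx).1
    rcases h x hmem with h0 | hall
    · omega
    rw [PySem.Set.issubset_iff]
    intro c hc
    rw [PySem.Set.mem_ofList, PySem.Int.toList_toStr] at hc
    unfold PySem.Int.toChars at hc
    rw [if_neg (by omega), pvToDigits_eq] at hc
    rw [PySem.Set.mem_ofList]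
    exact (pvRep_allP x hpos).mpr hall c hc

-- ===== VERDICT (by name: the statement is the Claim_ definition above) =====
theorem numai_numere_doar_cu_cifre_prime_spec : Claim_equal_numai_numere_doar_cu_cifre_prime := by
  intro l _
  unfold Spec_numai_numere_doar_cu_cifre_prime numai_numere_doar_cu_cifre_prime
  have hfold := pvFoldA_zero_iff l 0 le_rfl
  by_cases hP : ∀ x ∈ l, x ≤ 0 ∨ pvAllP x = true
  · rw [hfold.mpr ⟨rfl, hP⟩]
    simp [(pvAlt_iff l).mpr hP]
  · have hne : l.foldl (fun m x => pvWhileA x 0 m) 0 ≠ 0 := by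
      intro h0
      exact hP (hfold.mp h0).2
    simp only [hne, if_pos, ne_eq, not_false_eq_true]
    have : numai_numere_doar_cu_cifre_prime_alt l ≠ true := by
      intro h; exact hP ((pvAlt_iff l).mp h)
    simpa using this.symm ∘ Eq.symm
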